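-- pv_equiv track=rewrite | github.com/duttosourav8/Optimized-Tirgn | src/history_validity_gate.py | build_sr_history
-- ===== SOURCE A (Python) =====
-- from collections import defaultdict
-- from typing import Dict, List, Tuple
--
-- Triple = Tuple[int, int, int, int]
--
-- def build_sr_history(triples: List[Triple]) -> Dict[Tuple[int, int], Dict[int, List[int]]]:
--     sr_hist = defaultdict(lambda: defaultdict(list))
--     for s, r, o, t in triples:
--         sr_hist[(s, r)][o].append(t)
--     for sr_key in sr_hist:
--         for o in sr_hist[sr_key]:
--             sr_hist[sr_key][o].sort()
--     return sr_hist
-- ===== SOURCE B (Python) =====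
-- from collections import defaultdict
-- from typing import Dict, List, Tuple
--
-- Triple = Tuple[int, int, int, int]
--
-- def build_sr_history(triples: List[Triple]) -> Dict[Tuple[int, int], Dict[int, List[int]]]:
--     # Group by first-occurrence key lists (dict.fromkeys) and filters, instead of
--     # A's single accumulation pass plus a nested in-place sorting pass.
--     sr_hist = defaultdict(lambda: defaultdict(list))
--     sr_keys = list(dict.fromkeys((s, r) for s, r, _, _ in triples))
--     for sr in sr_keys:
--         group = [(o, t) for s, r, o, t in triples if (s, r) == sr]
--         objs = list(dict.fromkeys(o for o, _ in group))
--         for o in objs: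
--             sr_hist[sr][o] = sorted(t for o2, t in group if o2 == o)
--     return sr_hist
-- ===== Notes on version B (the rewrite author's own statement) =====
-- stated objective: alternative
-- what changed: B replaces A's single accumulation pass into a nested defaultdict followed by a nested in-place sort pass with a group-by decomposition: it computes the first-occurrence key lists via dict.fromkeys, extracts each (s,r)/object group by filtering, and builds each sorted timestamp list directly.
import Mathlib
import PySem

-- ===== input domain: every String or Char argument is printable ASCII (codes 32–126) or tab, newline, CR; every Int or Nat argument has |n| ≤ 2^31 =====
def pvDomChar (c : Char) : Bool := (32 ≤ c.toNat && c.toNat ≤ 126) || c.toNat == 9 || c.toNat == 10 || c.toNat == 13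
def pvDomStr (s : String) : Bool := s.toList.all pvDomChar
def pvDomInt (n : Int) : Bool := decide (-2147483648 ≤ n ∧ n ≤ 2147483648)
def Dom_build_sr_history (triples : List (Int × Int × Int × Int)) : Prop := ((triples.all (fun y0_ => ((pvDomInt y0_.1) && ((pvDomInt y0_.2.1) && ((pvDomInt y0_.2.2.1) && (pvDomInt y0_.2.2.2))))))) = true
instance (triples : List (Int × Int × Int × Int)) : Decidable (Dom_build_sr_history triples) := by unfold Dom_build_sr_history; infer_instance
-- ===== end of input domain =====

-- B rebuilds the same nested history by dict.fromkeys group-by with filters instead of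
-- A's accumulate-then-sort-in-place passes (objective: alternative decomposition).


-- ===== PORT A =====
-- first loop: sr_hist[(s,r)][o].append(t) on the nested defaultdict;
-- second loop: sort each timestamp list in place (ported as overwrite-insert, which keeps key positions)
def build_sr_history (triples : List (Int × Int × Int × Int)) : List (Int × Int × List (Int × List Int)) :=
  let sr0 : PySem.Dict (Int × Int) (PySem.Dict Int (List Int)) :=
    triples.foldl (fun d q =>
      d.insert (q.1, q.2.1)
        ((d.getD (q.1, q.2.1) PySem.Dict.empty).insert q.2.2.1
          (((d.getD (q.1, q.2.1) PySem.Dict.empty).getD q.2.2.1 []) ++ [q.2.2.2])))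
      PySem.Dict.empty
  let sr1 : PySem.Dict (Int × Int) (PySem.Dict Int (List Int)) :=
    sr0.keys.foldl (fun d sr =>
      d.insert sr
        ((d.getD sr PySem.Dict.empty).keys.foldl
          (fun di o => di.insert o (PySem.List.sorted (di.getD o []) (fun x => x)))
          (d.getD sr PySem.Dict.empty)))
      sr0
  sr1.items.map (fun p => (p.1.1, p.1.2, p.2.items))

-- ===== PORT B =====
def build_sr_history_alt (triples : List (Int × Int × Int × Int)) : List (Int × Int × List (Int × List Int)) :=
  let sr_keys : List (Int × Int) := PySem.List.dedup (triples.map (fun q => (q.1, q.2.1)))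
  let sr_hist : PySem.Dict (Int × Int) (PySem.Dict Int (List Int)) :=
    sr_keys.foldl (fun d sr =>
      let group : List (Int × Int) :=
        (triples.filter (fun q => (q.1, q.2.1) == sr)).map (fun q => (q.2.2.1, q.2.2.2))
      let objs : List Int := PySem.List.dedup (group.map (fun p => p.1))
      d.insert sr
        (objs.foldl
          (fun di o =>
            di.insert o (PySem.List.sorted ((group.filter (fun p => p.1 == o)).map (fun p => p.2)) (fun x => x)))
          (d.getD sr PySem.Dict.empty)))
      PySem.Dict.empty
  sr_hist.items.map (fun p => (p.1.1, p.1.2, p.2.items))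

-- ===== PRECONDITION & SPEC =====
def Spec_build_sr_history (triples : List (Int × Int × Int × Int)) (out : List (Int × Int × List (Int × List Int))) : Prop := out = build_sr_history_alt triples
instance (triples : List (Int × Int × Int × Int)) (out : List (Int × Int × List (Int × List Int))) : Decidable (Spec_build_sr_history triples out) := by unfold Spec_build_sr_history; infer_instance

-- ===== CLAIM (what is proved, stated in full; the proofs are below) =====
def Claim_equal_build_sr_history : Prop := ∀ (triples : List (Int × Int × Int × Int)), Dom_build_sr_history triples → Spec_build_sr_history triples (build_sr_history triples)

-- ===== LEMMAS AND PROOFS =====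

lemma pv_foldl_insert_self_getD {κ ν : Type} [BEq κ] [LawfulBEq κ] [DecidableEq κ]
    (f : ν → ν) (dflt : ν) :
    ∀ (ks : List κ) (d : PySem.Dict κ ν), ks.Nodup → ∀ j,
      (ks.foldl (fun d k => d.insert k (f (d.getD k dflt))) d).getD j dflt
        = if j ∈ ks then f (d.getD j dflt) else d.getD j dflt := by
  intro ks
  induction ks with
  | nil => intro d _ j; simp
  | cons k ks ih =>
    intro d hnd j
    simp only [List.foldl_cons]
    rw [ih _ hnd.of_cons j]
    by_cases hj : j = k
    · subst hj
      have hjks : j ∉ ks := (List.nodup_cons.mp hnd).1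
      simp [hjks, PySem.Dict.getD_insert_self]
    · rw [PySem.Dict.getD_insert_of_ne _ _ _ hj]
      simp [hj, List.mem_cons]

lemma pv_foldl_insert_self_keys {κ ν : Type} [BEq κ] [LawfulBEq κ]
    (f : ν → ν) (dflt : ν) :
    ∀ (ks : List κ) (d : PySem.Dict κ ν), (∀ k ∈ ks, d.contains k = true) →
      (ks.foldl (fun d k => d.insert k (f (d.getD k dflt))) d).keys = d.keys := by
  intro ks
  induction ks with
  | nil => intro d _; simp
  | cons k ks ih =>
    intro d hc
    simp only [List.foldl_cons]
    rw [ih _ ?_, PySem.Dict.keys_insert_of_contains _ _ (hc k (by simp))]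
    intro k' hk'
    rw [PySem.Dict.contains_insert]
    simp [hc k' (List.mem_cons_of_mem _ hk')]

lemma pv_foldl_insert_fresh_items {κ ν : Type} [BEq κ] [LawfulBEq κ]
    (g : κ → ν → ν) (dflt : ν) :
    ∀ (ks : List κ) (d : PySem.Dict κ ν), ks.Nodup → (∀ k ∈ ks, d.contains k = false) →
      (ks.foldl (fun d k => d.insert k (g k (d.getD k dflt))) d).items
        = d.items ++ ks.map (fun k => (k, g k dflt)) := by
  intro ks
  induction ks with
  | nil => intro d _ _; simp
  | cons k ks ih =>
    intro d hnd hc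
    simp only [List.foldl_cons, List.map_cons]
    rw [PySem.Dict.getD_of_not_contains _ _ (hc k (by simp))]
    rw [ih _ hnd.of_cons ?_, PySem.Dict.items_insert_of_not_contains _ _ (hc k (by simp))]
    · simp
    · intro k' hk'
      rw [PySem.Dict.contains_insert]
      have : k' ≠ k := fun h => (List.nodup_cons.mp hnd).1 (h ▸ hk')
      simp [this, hc k' (List.mem_cons_of_mem _ hk')]

-- A's first pass, restricted to one (s,r) bucket
lemma pv_nest_getD (l : List (Int × Int × Int × Int)) :
    ∀ (d : PySem.Dict (Int × Int) (PySem.Dict Int (List Int))) (sr : Int × Int),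
      (l.foldl (fun d q =>
          d.insert (q.1, q.2.1)
            ((d.getD (q.1, q.2.1) PySem.Dict.empty).insert q.2.2.1
              (((d.getD (q.1, q.2.1) PySem.Dict.empty).getD q.2.2.1 []) ++ [q.2.2.2]))) d).getD sr PySem.Dict.empty
        = (l.filter (fun q => (q.1, q.2.1) == sr)).foldl
            (fun di q => di.insert q.2.2.1 (di.getD q.2.2.1 [] ++ [q.2.2.2]))
            (d.getD sr PySem.Dict.empty) := by
  induction l with
  | nil => intro d sr; simp
  | cons q l ih =>
    intro d sr
    simp only [List.foldl_cons, List.filter_cons]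
    rw [ih]
    by_cases h : (q.1, q.2.1) = sr
    · simp only [h, beq_self_eq_true, if_true, List.foldl_cons]
      rw [PySem.Dict.getD_insert_self]
    · have hne : sr ≠ (q.1, q.2.1) := fun h' => h h'.symm
      rw [PySem.Dict.getD_insert_of_ne _ _ _ hne]
      simp [h]

lemma pv_innerD_getD (m : List (Int × Int × Int × Int))
    (di : PySem.Dict Int (List Int)) (o : Int) :
    (m.foldl (fun di q => di.insert q.2.2.1 (di.getD q.2.2.1 [] ++ [q.2.2.2])) di).getD o []
      = di.getD o []
        ++ ((m.map (fun q => (q.2.2.1, q.2.2.2))).filter (fun p => p.1 == o)).map (fun p => p.2) := by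
  have h := PySem.Dict.getD_foldl_modify_append (m.map (fun q => (q.2.2.1, q.2.2.2))) di o
  rw [List.foldl_map] at h
  simpa [PySem.Dict.modify] using h

lemma pv_innerD_keys (m : List (Int × Int × Int × Int)) (di : PySem.Dict Int (List Int)) :
    (m.foldl (fun di q => di.insert q.2.2.1 (di.getD q.2.2.1 [] ++ [q.2.2.2])) di).keys
      = PySem.Set.update di.keys (m.map (fun q => q.2.2.1)) :=
  PySem.Dict.keys_foldl_insert_key m (fun q => q.2.2.1) (fun di q => di.getD q.2.2.1 [] ++ [q.2.2.2]) di

-- the A-side per-bucket result, fully characterised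
lemma pv_entryA (triples : List (Int × Int × Int × Int)) (sr : Int × Int) :
    ((fun v : PySem.Dict Int (List Int) =>
        v.keys.foldl (fun di o => di.insert o (PySem.List.sorted (di.getD o []) (fun x => x))) v)
      ((triples.foldl (fun d q =>
          d.insert (q.1, q.2.1)
            ((d.getD (q.1, q.2.1) PySem.Dict.empty).insert q.2.2.1
              (((d.getD (q.1, q.2.1) PySem.Dict.empty).getD q.2.2.1 []) ++ [q.2.2.2])))
          PySem.Dict.empty).getD sr PySem.Dict.empty)).items
    = (PySem.Set.ofList
        (((triples.filter (fun q => (q.1, q.2.1) == sr)).map (fun q => (q.2.2.1, q.2.2.2))).map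
          (fun p => p.1))).map
        (fun o => (o, PySem.List.sorted
          ((((triples.filter (fun q => (q.1, q.2.1) == sr)).map (fun q => (q.2.2.1, q.2.2.2))).filter
              (fun p => p.1 == o)).map (fun p => p.2)) (fun x => x))) := by
  have h0 := pv_nest_getD triples PySem.Dict.empty sr
  set m := triples.filter (fun q => (q.1, q.2.1) == sr) with hm
  set inner := m.foldl (fun di q => di.insert q.2.2.1 (di.getD q.2.2.1 [] ++ [q.2.2.2]))
      PySem.Dict.empty with hinner
  have hempty : (PySem.Dict.empty : PySem.Dict (Int × Int) (PySem.Dict Int (List Int))).getD sr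
      PySem.Dict.empty = PySem.Dict.empty := PySem.Dict.getD_empty _ _
  rw [h0, hempty]
  have hik : inner.keys = PySem.Set.ofList (m.map (fun q => q.2.2.1)) := by
    rw [hinner, pv_innerD_keys]
    simp [PySem.Dict.keys, PySem.Dict.empty, PySem.Set.update_nil_left]
  have hiknd : inner.keys.Nodup := by rw [hik]; exact PySem.Set.nodup_ofList _
  have hcont : ∀ o ∈ inner.keys, inner.contains o = true :=
    fun o ho => (PySem.Dict.contains_iff_mem_keys _ _).mpr ho
  have hskeys : (inner.keys.foldl
      (fun di o => di.insert o (PySem.List.sorted (di.getD o []) (fun x => x))) inner).keys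
      = inner.keys :=
    pv_foldl_insert_self_keys (fun ts => PySem.List.sorted ts (fun x => x)) [] inner.keys inner hcont
  dsimp only
  rw [PySem.Dict.items_eq_map_keys _ (by rw [hskeys]; exact hiknd) ([] : List Int), hskeys]
  rw [hik]
  have hcollapse : (m.map (fun q => (q.2.2.1, q.2.2.2))).map (fun p => p.1)
      = m.map (fun q => q.2.2.1) := by
    simp [List.map_map, Function.comp]
  rw [hcollapse]
  apply List.map_congr_left
  intro o ho
  rw [← hik] at ho
  rw [← hik, pv_foldl_insert_self_getD (fun ts => PySem.List.sorted ts (fun x => x)) [] inner.keys inner hiknd o]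
  simp only [ho, if_pos]
  have hval : inner.getD o [] = (List.filter (fun p => p.1 == o)
      (m.map (fun q => (q.2.2.1, q.2.2.2)))).map (fun p => p.2) := by
    rw [hinner, pv_innerD_getD]
    simp [PySem.Dict.getD_empty]
  rw [hval]

-- the B-side per-bucket result
lemma pv_entryB (group : List (Int × Int)) :
    ((PySem.Set.ofList (group.map (fun p => p.1))).foldl
        (fun di o => di.insert o
          (PySem.List.sorted ((group.filter (fun p => p.1 == o)).map (fun p => p.2)) (fun x => x)))
        PySem.Dict.empty).items
    = (PySem.Set.ofList (group.map (fun p => p.1))).map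
        (fun o => (o, PySem.List.sorted ((group.filter (fun p => p.1 == o)).map (fun p => p.2))
          (fun x => x))) := by
  have h := PySem.Dict.items_foldl_insert_fresh (PySem.Set.ofList (group.map (fun p => p.1)))
    (fun o => o)
    (fun o => PySem.List.sorted ((group.filter (fun p => p.1 == o)).map (fun p => p.2)) (fun x => x))
    PySem.Dict.empty (fun a _ => PySem.Dict.contains_empty a)
    (by simpa using PySem.Set.nodup_ofList (group.map (fun p => p.1)))
  simp [PySem.Dict.empty] at h
  exact h

theorem pv_main (triples : List (Int × Int × Int × Int)) :
    build_sr_history triples = build_sr_history_alt triples := by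
  unfold build_sr_history build_sr_history_alt
  dsimp only []
  set sr0 : PySem.Dict (Int × Int) (PySem.Dict Int (List Int)) :=
    triples.foldl (fun d q =>
      d.insert (q.1, q.2.1)
        ((d.getD (q.1, q.2.1) PySem.Dict.empty).insert q.2.2.1
          (((d.getD (q.1, q.2.1) PySem.Dict.empty).getD q.2.2.1 []) ++ [q.2.2.2])))
      PySem.Dict.empty with hsr0
  set K2 : List (Int × Int) := PySem.Set.ofList (triples.map (fun q => (q.1, q.2.1))) with hK2
  have hK2nodup : K2.Nodup := PySem.Set.nodup_ofList _
  have hkeys0 : sr0.keys = K2 := by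
    rw [hsr0, PySem.Dict.keys_foldl_insert_key triples (fun q => (q.1, q.2.1))
      (fun d q => (d.getD (q.1, q.2.1) PySem.Dict.empty).insert q.2.2.1
          (((d.getD (q.1, q.2.1) PySem.Dict.empty).getD q.2.2.1 []) ++ [q.2.2.2])) PySem.Dict.empty]
    simp [PySem.Set.update_nil_left, PySem.Dict.keys, PySem.Dict.empty, hK2]
  set sortInner : PySem.Dict Int (List Int) → PySem.Dict Int (List Int) :=
    fun v => v.keys.foldl (fun di o => di.insert o (PySem.List.sorted (di.getD o []) (fun x => x))) v
    with hSI
  set sr1 : PySem.Dict (Int × Int) (PySem.Dict Int (List Int)) :=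
    sr0.keys.foldl (fun d sr => d.insert sr (sortInner (d.getD sr PySem.Dict.empty))) sr0 with hsr1
  have hcont0 : ∀ k ∈ sr0.keys, sr0.contains k = true := by
    intro k hk; exact (PySem.Dict.contains_iff_mem_keys _ _).mpr hk
  have hkeys1 : sr1.keys = K2 := by
    rw [hsr1, pv_foldl_insert_self_keys sortInner PySem.Dict.empty sr0.keys sr0 hcont0, hkeys0]
  have hgetD1 : ∀ sr ∈ K2, sr1.getD sr PySem.Dict.empty = sortInner (sr0.getD sr PySem.Dict.empty) := by
    intro sr hsr
    rw [hsr1, pv_foldl_insert_self_getD sortInner PySem.Dict.empty sr0.keys sr0 (hkeys0 ▸ hK2nodup) sr]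
    rw [hkeys0]; simp [hsr]
  have hitems1 : sr1.items = K2.map (fun sr => (sr, sr1.getD sr PySem.Dict.empty)) := by
    rw [PySem.Dict.items_eq_map_keys sr1 (hkeys1 ▸ hK2nodup) PySem.Dict.empty, hkeys1]
  simp only [PySem.List.dedup_eq_ofList]
  rw [← hK2]
  have hBitems := pv_foldl_insert_fresh_items
    (fun (sr : Int × Int) (v : PySem.Dict Int (List Int)) =>
      (PySem.Set.ofList
          (((triples.filter (fun q => (q.1, q.2.1) == sr)).map (fun q => (q.2.2.1, q.2.2.2))).map
            (fun p => p.1))).foldl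
        (fun di o => di.insert o
          (PySem.List.sorted
            ((((triples.filter (fun q => (q.1, q.2.1) == sr)).map (fun q => (q.2.2.1, q.2.2.2))).filter
                (fun p => p.1 == o)).map (fun p => p.2)) (fun x => x)))
        v)
    PySem.Dict.empty K2 PySem.Dict.empty hK2nodup
    (fun k _ => PySem.Dict.contains_empty k)
  rw [hBitems, hitems1]
  have hie : (PySem.Dict.empty : PySem.Dict (Int × Int) (PySem.Dict Int (List Int))).items = [] := rfl
  rw [hie, List.nil_append]
  apply congrArg
  apply List.map_congr_left
  intro sr hsr
  rw [hgetD1 sr hsr]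
  congr 1
  apply PySem.Dict.ext
  rw [hSI, hsr0]
  rw [pv_entryA triples sr,
    pv_entryB ((triples.filter (fun q => (q.1, q.2.1) == sr)).map (fun q => (q.2.2.1, q.2.2.2)))]

-- ===== VERDICT (by name: the statement is the Claim_ definition above) =====
theorem build_sr_history_spec : Claim_equal_build_sr_history := by
  intro triples _
  exact pv_main triples
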